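-- pv_equiv track=rewrite | github.com/Water-Stone/Baekjoon | 백준/Silver/1316. 그룹 단어 체커/그룹 단어 체커.py | check_group_word
-- ===== SOURCE A (Python) =====
-- def check_group_word(word):
--     if len(word) == 1:
--         return 1
--
--     prev = word[0]
--     pool = set()
--     for i, c in enumerate(word):
--         if i == 0 or prev == c:
--             continue
--         if c in pool:
--             return 0
--         pool.add(prev)
--         prev = c
--     return 1
-- ===== SOURCE B (Python) =====
-- def check_group_word(word):
--     groups = []
--     for c in word:
--         if not groups or groups[-1] != c:
--             groups.append(c)
--     return 1 if len(groups) == len(set(groups)) else 0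
-- ===== Notes on version B (the rewrite author's own statement) =====
-- stated objective: simpler
-- what changed: Replaces the incremental prev/pool early-exit scan with a two-step decomposition: collapse consecutive duplicates into a run-heads list, then return 1 iff that list has no repeated letter.
import Mathlib
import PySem

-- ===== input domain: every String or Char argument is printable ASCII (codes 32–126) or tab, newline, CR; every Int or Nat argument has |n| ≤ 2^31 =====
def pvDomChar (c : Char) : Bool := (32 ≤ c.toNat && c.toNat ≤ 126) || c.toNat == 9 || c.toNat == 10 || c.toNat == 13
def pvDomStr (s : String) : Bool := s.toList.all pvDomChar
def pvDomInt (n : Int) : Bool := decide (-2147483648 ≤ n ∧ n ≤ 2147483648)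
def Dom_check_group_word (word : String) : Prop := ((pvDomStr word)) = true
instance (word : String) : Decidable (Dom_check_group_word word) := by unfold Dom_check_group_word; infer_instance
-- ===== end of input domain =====

-- B collapses consecutive duplicate letters into the list of run heads and returns 1 iff
-- that list has no repeated letter — a build-then-check decomposition instead of A's
-- incremental prev/pool early-exit scan. Same O(n)-scan cost; chosen for clarity.

-- ===== PORT A =====
-- the for-loop of A: state is (prev, pool); early return 0 becomes a terminating branch
def cgwLoopA : List (Int × Char) → Char → PySem.Set Char → Int
  | [], _, _ => 1
  | (i, c) :: rest, prev, pool =>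
      if i = 0 ∨ prev = c then cgwLoopA rest prev pool
      else if PySem.Set.contains pool c then 0
      else cgwLoopA rest c (PySem.Set.add pool prev)

def check_group_word (word : String) : Int :=
  if PySem.Str.len word = 1 then 1
  else
    match PySem.Str.pyGet? word 0 with
    | none => 0   -- word[0] raises IndexError on the empty string; excluded by Pre_
    | some prev => cgwLoopA (PySem.List.enumerate word.toList 0) prev PySem.Set.empty

-- ===== PORT B =====
def check_group_word_alt (word : String) : Int :=
  let groups := word.toList.foldl
    (fun g c => if g.getLast? ≠ some c then g ++ [c] else g) []
  if (groups.length : Int) = PySem.Set.len (PySem.Set.ofList groups) then 1 else 0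

-- ===== PRECONDITION & SPEC =====
-- Pre_ excludes only the empty string, on which A raises IndexError at word[0].
def Pre_check_group_word (word : String) : Prop := word ≠ ""
instance (word : String) : Decidable (Pre_check_group_word word) := by
  unfold Pre_check_group_word; infer_instance
def pvWitness_check_group_word : String := "aab"

def Spec_check_group_word (word : String) (out : Int) : Prop := out = check_group_word_alt word
instance (word : String) (out : Int) : Decidable (Spec_check_group_word word out) := by
  unfold Spec_check_group_word; infer_instance

-- ===== CLAIM (what is proved, stated in full; the proofs are below) =====
def Claim_equal_check_group_word : Prop := ∀ (word : String), Dom_check_group_word word → Pre_check_group_word word → Spec_check_group_word word (check_group_word word)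

-- ===== LEMMAS AND PROOFS =====

-- the collapsed tail of a word, relative to the previous character
def cgwCollapseFrom (prev : Char) : List Char → List Char
  | [] => []
  | c :: t => if c = prev then cgwCollapseFrom prev t else c :: cgwCollapseFrom c t

-- A's loop over the enumerated tail (indices all nonzero) drops the index
def cgwLoopA' : List Char → Char → PySem.Set Char → Int
  | [], _, _ => 1
  | c :: rest, prev, pool =>
      if prev = c then cgwLoopA' rest prev pool
      else if PySem.Set.contains pool c then 0
      else cgwLoopA' rest c (PySem.Set.add pool prev)

lemma cgwLoopA_enum (t : List Char) : ∀ (s : Int) (prev : Char) (pool : PySem.Set Char),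
    0 < s → cgwLoopA (PySem.List.enumerate t s) prev pool = cgwLoopA' t prev pool := by
  induction t with
  | nil => intro s prev pool _; simp [PySem.List.enumerate_nil, cgwLoopA, cgwLoopA']
  | cons c rest ih =>
      intro s prev pool hs
      rw [PySem.List.enumerate_cons]
      simp only [cgwLoopA, cgwLoopA']
      rcases eq_or_ne prev c with hpc | hpc
      · rw [if_pos (Or.inr hpc), if_pos hpc, ih (s+1) _ _ (by omega)]
      · rw [if_neg (fun h => h.elim (fun h0 => absurd h0 (by omega)) hpc), if_neg hpc]
        split
        · rfl
        · exact ih (s+1) _ _ (by omega)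

lemma cgwNodupSnoc {pool : List Char} {prev : Char}
    (hnd : pool.Nodup) (hp : prev ∉ pool) : (pool ++ [prev]).Nodup := by
  rw [List.nodup_append]
  refine ⟨hnd, List.nodup_singleton prev, ?_⟩
  intro a ha b hb heq
  simp only [List.mem_singleton] at hb
  subst heq; subst hb; exact hp ha

-- characterisation of A's loop: 1 iff pool ++ prev :: collapsed tail is duplicate-free
lemma cgwLoopA'_eq (rest : List Char) : ∀ (prev : Char) (pool : List Char),
    pool.Nodup → prev ∉ pool →
    cgwLoopA' rest prev pool =
      (if (pool ++ prev :: cgwCollapseFrom prev rest).Nodup then 1 else 0) := by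
  induction rest with
  | nil =>
      intro prev pool hnd hp
      have hnodup : (pool ++ prev :: cgwCollapseFrom prev []).Nodup := by
        rw [show cgwCollapseFrom prev [] = [] from rfl]
        exact cgwNodupSnoc hnd hp
      simp [cgwLoopA', hnodup]
  | cons c t ih =>
      intro prev pool hnd hp
      rcases eq_or_ne prev c with hpc | hpc
      · have hcf : cgwCollapseFrom prev (c :: t) = cgwCollapseFrom prev t := by
          simp [cgwCollapseFrom, hpc.symm]
        rw [hcf]
        simp only [cgwLoopA']
        rw [if_pos hpc, ih prev pool hnd hp]
      · have hcf : cgwCollapseFrom prev (c :: t) = c :: cgwCollapseFrom c t := by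
          simp [cgwCollapseFrom, Ne.symm hpc]
        rw [hcf]
        simp only [cgwLoopA']
        rw [if_neg hpc]
        by_cases hmem : c ∈ pool
        · rw [if_pos (by simpa using hmem)]
          have hnot : ¬ (pool ++ prev :: c :: cgwCollapseFrom c t).Nodup := by
            intro h
            rcases List.nodup_append.1 h with ⟨_, _, hdisj⟩
            exact hdisj c hmem c (by simp) rfl
          rw [if_neg hnot]
        · rw [if_neg (by simp [hmem])]
          have hadd : PySem.Set.add pool prev = pool ++ [prev] := by
            simp [PySem.Set.add, hp]
          have hc' : c ∉ pool ++ [prev] := by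
            simp [hmem]
            exact fun h => hpc h.symm
          rw [hadd, ih c (pool ++ [prev]) (cgwNodupSnoc hnd hp) hc']
          have : (pool ++ [prev]) ++ c :: cgwCollapseFrom c t
              = pool ++ prev :: c :: cgwCollapseFrom c t := by simp
          rw [this]

-- B's fold builds exactly pre ++ prev :: collapsed tail
lemma cgwFoldB (cs : List Char) : ∀ (pre : List Char) (prev : Char),
    cs.foldl (fun g c => if g.getLast? ≠ some c then g ++ [c] else g) (pre ++ [prev])
      = pre ++ prev :: cgwCollapseFrom prev cs := by
  induction cs with
  | nil => intro pre prev; simp [cgwCollapseFrom]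
  | cons c t ih =>
      intro pre prev
      have hlast : (pre ++ [prev]).getLast? = some prev := by simp
      simp only [List.foldl_cons]
      rcases eq_or_ne c prev with h | h
      · have hstep : (if (pre ++ [prev]).getLast? ≠ some c then (pre ++ [prev]) ++ [c]
            else pre ++ [prev]) = pre ++ [prev] := by
          rw [if_neg (fun hcond => hcond (by rw [hlast, h]))]
        rw [hstep, ih pre prev]
        simp [cgwCollapseFrom, h]
      · have hstep : (if (pre ++ [prev]).getLast? ≠ some c then (pre ++ [prev]) ++ [c]
            else pre ++ [prev]) = (pre ++ [prev]) ++ [c] := by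
          rw [if_pos (fun hh => h (by rw [hlast] at hh; exact (Option.some.inj hh).symm))]
        rw [hstep, ih (pre ++ [prev]) c]
        simp [cgwCollapseFrom, h]

-- length of set(xs) equals length of xs iff xs has no duplicates
lemma cgwLenOfList (xs : List Char) :
    (PySem.Set.ofList xs).length = xs.length ↔ xs.Nodup := by
  induction xs using List.reverseRecOn with
  | nil => simp [PySem.Set.ofList_nil]
  | append_singleton t x ih =>
      rw [PySem.Set.ofList_append_singleton]
      have hle := PySem.Set.length_ofList_le (xs := t)
      by_cases hx : x ∈ PySem.Set.ofList t
      · have hadd : PySem.Set.add (PySem.Set.ofList t) x = PySem.Set.ofList t := by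
          simp [PySem.Set.add, hx]
        have hmem : x ∈ t := (PySem.Set.mem_ofList t x).1 hx
        constructor
        · intro h
          rw [hadd] at h
          simp only [List.length_append, List.length_singleton] at h
          omega
        · intro h
          rcases List.nodup_append.1 h with ⟨_, _, hdisj⟩
          exact (hdisj x hmem x (by simp) rfl).elim
      · have hadd : PySem.Set.add (PySem.Set.ofList t) x
            = PySem.Set.ofList t ++ [x] := by
          simp [PySem.Set.add, hx]
        have hmem : x ∉ t := fun h => hx ((PySem.Set.mem_ofList t x).2 h)
        rw [hadd]
        simp only [List.length_append, List.length_singleton]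
        constructor
        · intro h
          rw [List.nodup_append]
          refine ⟨ih.1 (by omega), List.nodup_singleton x, ?_⟩
          intro a ha b hb heq
          simp only [List.mem_singleton] at hb
          subst heq; subst hb; exact hmem ha
        · intro h
          rcases List.nodup_append.1 h with ⟨h1, _, _⟩
          have := ih.2 h1
          omega

-- B characterised through the same collapsed list
lemma cgwB_eq (word : String) (p : Char) (t : List Char) (h : word.toList = p :: t) :
    check_group_word_alt word
      = (if (p :: cgwCollapseFrom p t).Nodup then 1 else 0) := by
  have hf : List.foldl (fun g c => if g.getLast? ≠ some c then g ++ [c] else g)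
      ([] : List Char) (p :: t) = p :: cgwCollapseFrom p t := by
    have h2 := cgwFoldB t [] p
    simp only [List.nil_append] at h2
    simp only [List.foldl_cons]
    simp only [ne_eq] at h2 ⊢
    simpa using h2
  unfold check_group_word_alt
  rw [h, hf]
  set G := p :: cgwCollapseFrom p t with hG
  have hlen := cgwLenOfList G
  by_cases hnd : G.Nodup
  · have heq : (PySem.Set.ofList G).length = G.length := hlen.2 hnd
    simp [PySem.Set.len, hnd, heq]
  · have hne' : ¬ G.length = (PySem.Set.ofList G).length :=
      fun hc => hnd (hlen.1 hc.symm)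
    simp [hnd, hne']

-- ===== VERDICT (by name: the statement is the Claim_ definition above) =====
theorem check_group_word_spec : Claim_equal_check_group_word := by
  intro word _ hpre
  unfold Spec_check_group_word
  obtain ⟨p, t, h⟩ : ∃ p t, word.toList = p :: t := by
    cases hw : word.toList with
    | nil =>
        exfalso
        apply hpre
        have := congrArg String.ofList hw
        simpa using this
    | cons p t => exact ⟨p, t, rfl⟩
  rw [cgwB_eq word p t h]
  unfold check_group_word
  have hlenw : PySem.Str.len word = ((p :: t).length : Int) := by
    rw [PySem.Str.len_eq, h]
  by_cases h1 : PySem.Str.len word = 1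
  · have ht : t = [] := by
      rw [hlenw] at h1
      simp only [List.length_cons] at h1
      have : t.length = 0 := by omega
      simpa using this
    subst ht
    rw [if_pos h1]
    simp [cgwCollapseFrom]
  · rw [if_neg h1]
    have hget : PySem.Str.pyGet? word 0 = some p := by
      have := PySem.Str.pyGet?_natCast word 0
      simp only [Nat.cast_zero] at this
      rw [this, h]
      rfl
    rw [hget, h, PySem.List.enumerate_cons]
    simp only [cgwLoopA]
    rw [if_pos (Or.inl trivial)]
    rw [cgwLoopA_enum t (0 + 1) p PySem.Set.empty (by norm_num)]
    rw [cgwLoopA'_eq t p PySem.Set.empty List.nodup_nil (by simp [PySem.Set.empty])]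
    simp [PySem.Set.empty]
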